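-- pv_equiv track=rewrite | github.com/dieros/python-test-strings | solution/solution.py | solution
-- ===== SOURCE A (Python) =====
-- def solution(S):
--     """Get max distance between two identical digrams in S."""
--
--     last_seen = {}
--     max_distance = -1
--
--     for i in range(len(S) - 1):
--         digram = S[i:i+2]
--
--         if digram in last_seen:
--             distance = i - last_seen[digram]
--             max_distance = max(max_distance, distance)
--         else:
--             last_seen[digram] = i
--
--     return max_distance
-- ===== SOURCE B (Python) =====
-- def solution(S):
--     """Get max distance between two identical digrams in S."""
--     # Search downward for the largest shift t at which some digram equals the digram t to its right.
--     n = len(S)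
--     for t in range(n - 2, 0, -1):
--         if any(S[i:i+2] == S[i+t:i+t+2] for i in range(n - 1 - t)):
--             return t
--     return -1
-- ===== Notes on version B (the rewrite author's own statement) =====
-- stated objective: alternative
-- what changed: B drops A's first-occurrence dictionary entirely: it searches shifts t downward from len(S)-2 and returns the first (largest) t at which some digram S[i:i+2] equals S[i+t:i+t+2], since the max first-to-last distance of a repeated digram is exactly the largest self-match shift; it trades A's linear dictionary pass for a dict-free shift search that is fast when the answer is large but quadratic when the answer is small.
import Mathlib
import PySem

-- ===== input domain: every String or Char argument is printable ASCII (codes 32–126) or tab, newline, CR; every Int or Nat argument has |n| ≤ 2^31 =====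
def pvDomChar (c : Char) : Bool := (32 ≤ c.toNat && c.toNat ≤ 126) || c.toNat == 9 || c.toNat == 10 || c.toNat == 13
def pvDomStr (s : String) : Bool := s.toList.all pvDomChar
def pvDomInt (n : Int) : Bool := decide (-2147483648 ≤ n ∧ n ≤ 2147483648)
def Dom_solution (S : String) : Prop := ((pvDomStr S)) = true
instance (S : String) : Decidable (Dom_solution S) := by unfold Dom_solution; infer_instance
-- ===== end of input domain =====

-- B replaces A's first-occurrence dictionary by a dict-free downward search for the largest shift t
-- at which some digram equals the digram t positions to its right (alternative algorithm).


-- ===== PORT A =====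
def solution (S : String) : Int :=
  let L := S.toList
  let st := (PySem.List.pyRange 0 (PySem.Str.len S - 1)).foldl
    (fun (st : PySem.Dict (List Char) Int × Int) i =>
      let digram := PySem.List.slice L (some i) (some (i + 2))
      match st.1.get? digram with
      | some v => (st.1, max st.2 (i - v))
      | none => (st.1.insert digram i, st.2))
    (PySem.Dict.empty, -1)
  st.2

-- ===== PORT B =====
-- 'for t in range(n-2, 0, -1): if any(...): return t' (first hit = largest t), else -1
def solution_alt (S : String) : Int :=
  let L := S.toList
  let n := PySem.Str.len S
  match (PySem.List.pyRange (n - 2) 0 (-1)).find? (fun t =>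
      (PySem.List.pyRange 0 (n - 1 - t)).any (fun i =>
        PySem.List.slice L (some i) (some (i + 2)) ==
        PySem.List.slice L (some (i + t)) (some (i + t + 2)))) with
  | some t => t
  | none => -1

-- range(len(S)-1) is empty also for the empty string: the bound is the truncated length-1

-- ===== PRECONDITION & SPEC =====
def Spec_solution (S : String) (out : Int) : Prop := out = solution_alt S
instance (S : String) (out : Int) : Decidable (Spec_solution S out) := by unfold Spec_solution; infer_instance

-- ===== CLAIM (what is proved, stated in full; the proofs are below) =====
def Claim_equal_solution : Prop := ∀ (S : String), Dom_solution S → Spec_solution S (solution S)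

-- ===== LEMMAS AND PROOFS =====

-- the digram starting at position i, as A's slice computes it
def dig (L : List Char) (i : Int) : List Char :=
  PySem.List.slice L (some i) (some (i + 2))

-- A's loop body under a name the lemmas can speak about
def stepA (L : List Char) (st : PySem.Dict (List Char) Int × Int) (i : Int) :
    PySem.Dict (List Char) Int × Int :=
  match st.1.get? (dig L i) with
  | some v => (st.1, max st.2 (i - v))
  | none => (st.1.insert (dig L i) i, st.2)

-- A's loop invariant: the dict holds, per digram, an index bearing it that is no later than any
-- other index bearing it; the accumulator dominates every matching-pair distance seen so far and
-- is itself -1 or such a distance.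
lemma A_inv (L : List Char) (N : Nat) :
    (∀ d v, ((PySem.List.pyRange 0 (N : Int)).foldl (stepA L) (PySem.Dict.empty, -1)).1.get? d
        = some v → 0 ≤ v ∧ v < (N : Int) ∧ dig L v = d) ∧
    (∀ j : Int, 0 ≤ j → j < (N : Int) →
        ∃ v, ((PySem.List.pyRange 0 (N : Int)).foldl (stepA L) (PySem.Dict.empty, -1)).1.get? (dig L j)
          = some v ∧ v ≤ j) ∧
    (∀ j i : Int, 0 ≤ j → j < i → i < (N : Int) → dig L j = dig L i →
        i - j ≤ ((PySem.List.pyRange 0 (N : Int)).foldl (stepA L) (PySem.Dict.empty, -1)).2) ∧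
    (((PySem.List.pyRange 0 (N : Int)).foldl (stepA L) (PySem.Dict.empty, -1)).2 = -1 ∨
      ∃ j i : Int, 0 ≤ j ∧ j < i ∧ i < (N : Int) ∧ dig L j = dig L i ∧
        ((PySem.List.pyRange 0 (N : Int)).foldl (stepA L) (PySem.Dict.empty, -1)).2 = i - j) := by
  induction N with
  | zero =>
      refine ⟨?_, ?_, ?_, ?_⟩
      · intro d v h
        rw [show ((0 : Nat) : Int) = 0 by norm_num, show PySem.List.pyRange 0 0 = [] from by decide] at h
        simp [PySem.Dict.get?_empty] at h
      · intro j h1 h2; exfalso; omega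
      · intro j i h1 h2 h3; exfalso; omega
      · left
        rw [show ((0 : Nat) : Int) = 0 by norm_num, show PySem.List.pyRange 0 0 = [] from by decide]
        rfl
  | succ N ih =>
      obtain ⟨i1, i2, i3, i4⟩ := ih
      have hsplit : PySem.List.pyRange 0 ((N + 1 : Nat) : Int)
          = PySem.List.pyRange 0 (N : Int) ++ [(N : Int)] := by
        rw [show ((N + 1 : Nat) : Int) = (N : Int) + 1 by push_cast; ring]
        exact PySem.List.pyRange_one_succ_right (by positivity)
      rw [hsplit, List.foldl_append]
      set st := (PySem.List.pyRange 0 (N : Int)).foldl (stepA L) (PySem.Dict.empty, -1) with hst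
      simp only [List.foldl_cons, List.foldl_nil]
      rcases hg : st.1.get? (dig L (N : Int)) with _ | v
      · -- unseen digram: insert, accumulator unchanged
        have hstep : stepA L st (N : Int) = (st.1.insert (dig L (N : Int)) (N : Int), st.2) := by
          simp [stepA, hg]
        rw [hstep]
        refine ⟨?_, ?_, ?_, ?_⟩
        · intro d v h
          rw [PySem.Dict.get?_insert] at h
          split at h
          · cases h
            exact ⟨by positivity, by push_cast; omega, by simp_all⟩
          · obtain ⟨a, b, c⟩ := i1 d v h
            exact ⟨a, by omega, c⟩
        · intro j h1 h2
          by_cases he : dig L j = dig L (N : Int)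
          · refine ⟨(N : Int), ?_, ?_⟩
            · rw [he, PySem.Dict.get?_insert, if_pos rfl]
            · -- j ≤ N: if j < N the old dict would have held dig L j = dig L N, contradicting hg
              by_cases hj : j < (N : Int)
              · exfalso
                obtain ⟨v, hv, _⟩ := i2 j h1 hj
                rw [he, hg] at hv
                cases hv
              · push_cast at h2; omega
          · rw [PySem.Dict.get?_insert, if_neg he]
            have hj : j < (N : Int) := by
              rcases lt_or_ge j (N : Int) with h | h
              · exact h
              · exfalso; apply he; congr 1; push_cast at h2; omega
            exact i2 j h1 hj
        · intro j i h1 h2 h3 h4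
          by_cases hi : i < (N : Int)
          · exact i3 j i h1 h2 hi h4
          · exfalso
            have : i = (N : Int) := by push_cast at h3; omega
            subst this
            obtain ⟨v, hv, _⟩ := i2 j h1 (by omega)
            rw [h4, hg] at hv
            cases hv
        · rcases i4 with h | ⟨j, i, a, b, c, d, e⟩
          · left; exact h
          · right; exact ⟨j, i, a, b, by push_cast; omega, d, e⟩
      · -- seen digram: accumulator bumps to max with distance to the stored index
        have hstep : stepA L st (N : Int) = (st.1, max st.2 ((N : Int) - v)) := by
          simp [stepA, hg]
        rw [hstep]
        obtain ⟨hv0, hvN, hvd⟩ := i1 _ _ hg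
        refine ⟨?_, ?_, ?_, ?_⟩
        · intro d v' h
          obtain ⟨a, b, c⟩ := i1 d v' h
          exact ⟨a, by omega, c⟩
        · intro j h1 h2
          by_cases hj : j < (N : Int)
          · exact i2 j h1 hj
          · have : j = (N : Int) := by push_cast at h2; omega
            subst this
            exact ⟨v, hg, by omega⟩
        · intro j i h1 h2 h3 h4
          by_cases hi : i < (N : Int)
          · exact le_trans (i3 j i h1 h2 hi h4) (le_max_left _ _)
          · have : i = (N : Int) := by push_cast at h3; omega
            subst this
            -- stored v is ≤ j (both bear the same digram), so i - j ≤ i - v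
            obtain ⟨v', hv', hvj⟩ := i2 j h1 (by omega)
            rw [h4, hg] at hv'
            cases hv'
            have : (N : Int) - j ≤ (N : Int) - v := by omega
            exact le_trans this (le_max_right _ _)
        · right
          by_cases h : ((N : Int) - v) ≤ st.2
          · rcases i4 with h4 | ⟨j, i, a, b, c, d, e⟩
            · exfalso; rw [h4] at h; omega
            · exact ⟨j, i, a, b, by push_cast; omega, d, by rw [max_eq_left h]; exact e⟩
          · exact ⟨v, (N : Int), hv0, by omega, by push_cast; omega, hvd,
              by rw [max_eq_right (by omega)]⟩

-- the descending search: what find? over range(K, 0, -1) finding/failing means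
lemma find_desc (p : Int → Bool) (K : Nat) :
    (∀ t, (PySem.List.pyRange (K : Int) 0 (-1)).find? p = some t →
      p t = true ∧ 1 ≤ t ∧ t ≤ (K : Int) ∧ ∀ t', t < t' → t' ≤ (K : Int) → p t' = false) ∧
    ((PySem.List.pyRange (K : Int) 0 (-1)).find? p = none →
      ∀ t', 1 ≤ t' → t' ≤ (K : Int) → p t' = false) := by
  induction K with
  | zero =>
      constructor
      · intro t ht
        rw [show ((0 : Nat) : Int) = 0 by norm_num] at ht
        simp [show PySem.List.pyRange 0 0 (-1) = [] from by decide] at ht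
      · intro _ t' h1 h2
        omega
  | succ K ih =>
      have hcons : PySem.List.pyRange ((K + 1 : Nat) : Int) 0 (-1)
          = ((K + 1 : Nat) : Int) :: PySem.List.pyRange (K : Int) 0 (-1) := by
        have h := PySem.List.pyRange_neg_one_cons (a := ((K + 1 : Nat) : Int)) (b := 0) (by positivity)
        rw [h]
        norm_num
      rw [hcons]
      by_cases hp : p ((K + 1 : Nat) : Int) = true
      · constructor
        · intro t ht
          rw [List.find?_cons_of_pos hp] at ht
          cases ht
          exact ⟨hp, by push_cast; omega, le_refl _, fun t' h1 h2 => by omega⟩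
        · intro hnone
          rw [List.find?_cons_of_pos hp] at hnone
          cases hnone
      · rw [List.find?_cons_of_neg hp]
        constructor
        · intro t ht
          obtain ⟨h1, h2, h3, h4⟩ := ih.1 t ht
          refine ⟨h1, h2, by push_cast; omega, fun t' hlt hle => ?_⟩
          by_cases he : t' = ((K + 1 : Nat) : Int)
          · rw [he]; simpa using hp
          · exact h4 t' hlt (by push_cast at hle ⊢; omega)
        · intro hnone t' h1 h2
          by_cases he : t' = ((K + 1 : Nat) : Int)
          · rw [he]; simpa using hp
          · exact ih.2 hnone t' h1 (by push_cast at h2 ⊢; omega)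

lemma pyRange_pred (n : Nat) :
    PySem.List.pyRange 0 ((n : Int) - 1) = PySem.List.pyRange 0 (((n - 1 : Nat) : Int)) := by
  cases n with
  | zero =>
      rw [PySem.List.pyRange_one_eq_nil (by norm_num), PySem.List.pyRange_one_eq_nil (by norm_num)]
  | succ n =>
      have h : ((n + 1 : Nat) : Int) - 1 = ((n + 1 - 1 : Nat) : Int) := by push_cast; ring
      rw [h]

-- B's search predicate holds at t exactly when some digram recurs t positions later

lemma pany (L : List Char) (b t : Int) :
    ((PySem.List.pyRange 0 b).any (fun i => dig L i == dig L (i + t)) = true)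
      ↔ ∃ i : Int, 0 ≤ i ∧ i < b ∧ dig L i = dig L (i + t) := by
  rw [List.any_eq_true]
  constructor
  · rintro ⟨i, hmem, hp⟩
    rw [PySem.List.mem_pyRange_one] at hmem
    exact ⟨i, hmem.1, hmem.2, by simpa using hp⟩
  · rintro ⟨i, h1, h2, h3⟩
    exact ⟨i, PySem.List.mem_pyRange_one.mpr ⟨h1, h2⟩, by simpa using h3⟩

-- A's accumulator and B's largest matching shift coincide
lemma solution_spec' (S : String) : solution S = solution_alt S := by
  simp only [solution, solution_alt, PySem.Str.len_eq]
  set L := S.toList with hL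
  set N := L.length with hN
  -- A's fold, under its proof-side name and a Nat bound
  have hA : ((PySem.List.pyRange 0 ((N : Int) - 1)).foldl
      (fun (st : PySem.Dict (List Char) Int × Int) i =>
        let digram := PySem.List.slice L (some i) (some (i + 2))
        match st.1.get? digram with
        | some v => (st.1, max st.2 (i - v))
        | none => (st.1.insert digram i, st.2))
      (PySem.Dict.empty, -1))
      = ((PySem.List.pyRange 0 (((N - 1 : Nat)) : Int)).foldl (stepA L) (PySem.Dict.empty, -1)) := by
    rw [pyRange_pred]
    rfl
  rw [hA]
  obtain ⟨i1, i2, i3, i4⟩ := A_inv L (N - 1)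
  set st := (PySem.List.pyRange 0 (((N - 1 : Nat)) : Int)).foldl (stepA L) (PySem.Dict.empty, -1) with hst
  -- B's descending range, with a Nat bound
  have hB : PySem.List.pyRange ((N : Int) - 2) 0 (-1)
      = PySem.List.pyRange (((N - 2 : Nat)) : Int) 0 (-1) := by
    by_cases h2 : 2 ≤ N
    · congr 1; omega
    · rw [PySem.List.pyRange_neg_one_eq_nil (by omega),
        PySem.List.pyRange_neg_one_eq_nil (by omega)]
  rw [hB]
  set p : Int → Bool := fun t =>
      (PySem.List.pyRange 0 ((N : Int) - 1 - t)).any (fun i =>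
        PySem.List.slice L (some i) (some (i + 2)) ==
        PySem.List.slice L (some (i + t)) (some (i + t + 2))) with hp
  have hpdig : ∀ t, p t = (PySem.List.pyRange 0 ((N : Int) - 1 - t)).any
      (fun i => dig L i == dig L (i + t)) := fun t => rfl
  obtain ⟨hfound, hnone⟩ := find_desc p (N - 2)
  -- every matching pair makes p true at its distance
  have hpair_p : ∀ j i : Int, 0 ≤ j → j < i → i < (((N - 1 : Nat)) : Int) → dig L j = dig L i →
      p (i - j) = true ∧ 1 ≤ i - j ∧ i - j ≤ (((N - 2 : Nat)) : Int) := by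
    intro j i h1 h2 h3 h4
    refine ⟨?_, by omega, by omega⟩
    rw [hpdig, pany]
    exact ⟨j, h1, by omega, by rw [show j + (i - j) = i by ring]; exact h4⟩
  rcases hfind : (PySem.List.pyRange (((N - 2 : Nat)) : Int) 0 (-1)).find? p with _ | t
  · -- nothing found: A's accumulator cannot be a pair distance
    rcases i4 with h | ⟨j, i, a, b, c, d, e⟩
    · exact h
    · exfalso
      obtain ⟨hpt, ht1, htK⟩ := hpair_p j i a b c d
      rw [hnone hfind (i - j) ht1 htK] at hpt
      cases hpt
  · -- found the largest matching shift t: it equals A's accumulator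
    obtain ⟨hpt, ht1, htK, hmax⟩ := hfound t hfind
    rw [hpdig, pany] at hpt
    obtain ⟨i0, hi0, hi1, hi2⟩ := hpt
    have hle : t ≤ st.2 := by
      have := i3 i0 (i0 + t) hi0 (by omega) (by omega) hi2
      omega
    have hge : st.2 ≤ t := by
      rcases i4 with h | ⟨j, i, a, b, c, d, e⟩
      · omega
      · obtain ⟨hpm, hm1, hmK⟩ := hpair_p j i a b c d
        by_contra hlt
        rw [hmax (i - j) (by omega) hmK] at hpm
        cases hpm
    have heq : st.2 = t := by omega
    simpa using heq

-- ===== VERDICT (by name: the statement is the Claim_ definition above) =====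
theorem solution_spec : Claim_equal_solution := by
  intro S _
  exact solution_spec' S
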